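-- pv_equiv track=rewrite | github.com/pisterlabs/promptset | data/scraping-2.0/repos/SuhaibAslam~PoetryMirror/src~PoemGenerator.py | newline_cutoff
-- ===== SOURCE A (Python) =====
-- def replace_dash(text):
--     text2 = ""
--     weird_chars = ["-", "_", "(", ")", "—", "\"", ":", "[", "]", "“", "’", "‘", "”"]
--     for i in text:
--         if i in weird_chars:
--             text2 += " "
--         else:
--             text2 += i
--     return text2
--
-- def newline_cutoff(text):
--     text = replace_dash(text)
--     special_chars = ["\n", ".", ";", "!", "?"]
--     sentence = ""
--
--     for i in text:
--         if i not in special_chars: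
--             sentence += i
--         else:
--             break
--     if len(sentence.split()) < 3:
--         sentence = ""
--         temp = 0
--         for i in text:
--             if i not in special_chars:
--                 sentence += i
--             elif i == ".":
--                 pass
--             else:
--                 temp += 1
--                 if temp == 2:
--                     break
--     return sentence
-- ===== SOURCE B (Python) =====
-- # B: split-and-slice over fragment lists instead of char-accumulation loops with break/counter.
-- _WEIRD = str.maketrans({c: " " for c in '-_()\u2014":[]\u201c\u2019\u2018\u201d'})
--
-- def _split_all(text, seps):
--     # split text on every character in seps, keeping fragment order
--     parts = [text]
--     for sep in seps:
--         parts = [piece for frag in parts for piece in frag.split(sep)]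
--     return parts
--
-- def newline_cutoff(text):
--     text = text.translate(_WEIRD)
--     first = _split_all(text, "\n.;!?")[0]
--     if len(first.split()) >= 3:
--         return first
--     parts = _split_all(text, "\n;!?")
--     return "".join(parts[:2]).replace(".", "")
-- ===== Notes on version B (the rewrite author's own statement) =====
-- stated objective: simpler
-- what changed: B replaces A's two character-accumulation loops (prefix loop with break, and the skip-period loop with a temp counter) by split-and-slice over fragment lists (first fragment, then join of the first two fragments over the separator class without the period, periods stripped after), with the weird-char pass done by str.translate instead of a char-by-char concatenation loop.
import Mathlib
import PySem

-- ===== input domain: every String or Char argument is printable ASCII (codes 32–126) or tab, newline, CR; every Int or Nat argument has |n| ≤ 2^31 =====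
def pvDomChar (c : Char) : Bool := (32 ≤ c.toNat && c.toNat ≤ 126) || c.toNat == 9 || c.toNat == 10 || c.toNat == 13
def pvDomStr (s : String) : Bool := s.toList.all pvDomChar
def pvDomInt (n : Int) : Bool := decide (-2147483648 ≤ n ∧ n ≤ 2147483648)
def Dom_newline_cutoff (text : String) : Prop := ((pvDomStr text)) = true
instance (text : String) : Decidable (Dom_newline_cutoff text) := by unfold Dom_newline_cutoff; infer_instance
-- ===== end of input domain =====

-- B replaces A's two char-accumulation loops (break / temp counter) with split-and-slice over
-- fragment lists; objective: simpler.

-- ===== PORT A =====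
def pvWeirdA : List Char := ['-', '_', '(', ')', '—', '"', ':', '[', ']', '“', '’', '‘', '”']
def pvSpecialA : List Char := ['\n', '.', ';', '!', '?']

-- for i in text: text2 += " " if i in weird_chars else i
def replaceDashA (text : List Char) : List Char :=
  text.foldl (fun t2 i => if i ∈ pvWeirdA then t2 ++ [' '] else t2 ++ [i]) []

-- first loop: sentence += i until a special char, then break
def pvLoop1A : List Char → List Char
  | [] => []
  | i :: rest => if i ∉ pvSpecialA then i :: pvLoop1A rest else []

-- second loop: append non-special chars, skip '.', break at the second other special char
def pvLoop2A : List Char → Nat → List Char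
  | [], _ => []
  | i :: rest, temp =>
    if i ∉ pvSpecialA then i :: pvLoop2A rest temp
    else if i == '.' then pvLoop2A rest temp
    else if temp + 1 == 2 then [] else pvLoop2A rest (temp + 1)

def newline_cutoff (text : String) : String :=
  let t := replaceDashA text.toList
  let sentence := pvLoop1A t
  if (PySem.Chars.split₀ sentence).length < 3 then String.ofList (pvLoop2A t 0)
  else String.ofList sentence

-- ===== PORT B =====
def pvWeirdB : List Char := "-_()—\":[]“’‘”".toList

-- text.translate(_WEIRD)
def translateB (text : List Char) : List Char :=
  text.map (fun c => if c ∈ pvWeirdB then ' ' else c)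

-- frag.split(sep) for a single-character separator
def splitCharB (sep : Char) : List Char → List (List Char)
  | [] => [[]]
  | c :: t =>
    if c == sep then [] :: splitCharB sep t
    else match splitCharB sep t with
         | [] => [[c]]          -- unreachable: splitCharB never returns []
         | h :: r => (c :: h) :: r

-- _split_all: successively split every fragment on each separator
def splitAllB (text : List Char) (seps : List Char) : List (List Char) :=
  seps.foldl (fun parts sep => parts.flatMap (splitCharB sep)) [text]

def newline_cutoff_alt (text : String) : String :=
  let t := translateB text.toList
  -- parts[0]: splitAllB is provably nonempty, so headD is exact here
  let first := (splitAllB t ['\n', '.', ';', '!', '?']).headD []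
  if 3 ≤ (PySem.Chars.split₀ first).length then String.ofList first
  else
    let parts := splitAllB t ['\n', ';', '!', '?']
    -- "".join(parts[:2]).replace(".", ""): removing every '.' is exactly a filter
    String.ofList (((parts.take 2).flatten).filter (fun c => c ≠ '.'))

-- ===== PRECONDITION & SPEC =====
def Spec_newline_cutoff (text : String) (out : String) : Prop := out = newline_cutoff_alt text
instance (text : String) (out : String) : Decidable (Spec_newline_cutoff text out) := by unfold Spec_newline_cutoff; infer_instance

-- ===== CLAIM (what is proved, stated in full; the proofs are below) =====
def Claim_equal_newline_cutoff : Prop := ∀ (text : String), Dom_newline_cutoff text → Spec_newline_cutoff text (newline_cutoff text)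

-- ===== LEMMAS AND PROOFS =====

-- generalized single-pass split on a predicate
def consHead (c : Char) : List (List Char) → List (List Char)
  | [] => [[c]]
  | h :: r => (c :: h) :: r

def splitP (p : Char → Bool) : List Char → List (List Char)
  | [] => [[]]
  | c :: t => if p c then [] :: splitP p t else consHead c (splitP p t)

theorem splitP_ne_nil (p : Char → Bool) (l : List Char) : splitP p l ≠ [] := by
  induction l with
  | nil => simp [splitP]
  | cons c t ih =>
    simp only [splitP]
    split
    · simp
    · cases h : splitP p t <;> simp [consHead]

theorem splitCharB_eq (sep : Char) (l : List Char) :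
    splitCharB sep l = splitP (fun c => c == sep) l := by
  induction l with
  | nil => rfl
  | cons c t ih =>
    simp only [splitCharB, splitP, ih]
    split
    · rfl
    · cases splitP (fun c => c == sep) t <;> rfl

theorem splitP_false (l : List Char) : splitP (fun _ => false) l = [l] := by
  induction l with
  | nil => rfl
  | cons c t ih => simp [splitP, ih, consHead]

theorem splitP_flatMap (p q : Char → Bool) (l : List Char) :
    (splitP p l).flatMap (splitP q) = splitP (fun c => p c || q c) l := by
  induction l with
  | nil => simp [splitP]
  | cons c t ih =>
    by_cases hp : p c
    · simp only [splitP, hp, if_true, Bool.true_or, List.flatMap_cons]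
      rw [ih]
      rfl
    · cases ht : splitP p t with
      | nil => exact absurd ht (splitP_ne_nil p t)
      | cons h r =>
        rw [ht] at ih
        simp only [List.flatMap_cons] at ih
        have hsplit : splitP p (c :: t) = (c :: h) :: r := by
          simp [splitP, hp, ht, consHead]
        rw [hsplit, List.flatMap_cons]
        by_cases hq : q c
        · have hr : splitP (fun c => p c || q c) (c :: t)
              = [] :: splitP (fun c => p c || q c) t := by simp [splitP, hq]
          rw [hr, ← ih]
          simp [splitP, hq]
        · have hr : splitP (fun c => p c || q c) (c :: t)
              = consHead c (splitP (fun c => p c || q c) t) := by simp [splitP, hp, hq]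
          have h2 : splitP q (c :: h) = consHead c (splitP q h) := by simp [splitP, hq]
          rw [hr, ← ih, h2]
          cases hh : splitP q h with
          | nil => exact absurd hh (splitP_ne_nil q h)
          | cons h2' r2 => simp [consHead]

theorem splitAllB_eq (l : List Char) (seps : List Char) :
    splitAllB l seps = splitP (fun c => c ∈ seps) l := by
  unfold splitAllB
  have key : ∀ (ss : List Char) (p : Char → Bool),
      ss.foldl (fun parts sep => parts.flatMap (splitCharB sep)) (splitP p l)
        = splitP (fun c => p c || decide (c ∈ ss)) l := by
    intro ss
    induction ss with
    | nil => intro p; simp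
    | cons s rest ih =>
      intro p
      simp only [List.foldl_cons]
      have hstep : (splitP p l).flatMap (splitCharB s) = splitP (fun c => p c || (c == s)) l := by
        rw [funext (fun x => splitCharB_eq s x)]
        exact splitP_flatMap p (fun c => c == s) l
      rw [hstep, ih]
      congr 1
      funext c
      by_cases hcs : c = s <;> by_cases hcr : c ∈ rest <;> simp [hcs, hcr]
  have h2 := key seps (fun _ => false)
  rw [splitP_false l] at h2
  rw [h2]
  congr 1

theorem splitP_headD (p : Char → Bool) (l : List Char) :
    (splitP p l).headD [] = l.takeWhile (fun c => ! p c) := by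
  induction l with
  | nil => rfl
  | cons c t ih =>
    by_cases hp : p c
    · simp [splitP, hp]
    · have hsplit : splitP p (c :: t) = consHead c (splitP p t) := by simp [splitP, hp]
      rw [hsplit]
      cases ht : splitP p t with
      | nil => exact absurd ht (splitP_ne_nil p t)
      | cons h r =>
        rw [ht] at ih
        simp [consHead, hp, ← ih]

theorem pvLoop1A_eq_takeWhile (l : List Char) :
    pvLoop1A l = l.takeWhile (fun c => ! decide (c ∈ pvSpecialA)) := by
  induction l with
  | nil => rfl
  | cons c t ih =>
    have hA : pvLoop1A (c :: t) = if c ∉ pvSpecialA then c :: pvLoop1A t else [] := rfl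
    rw [hA, List.takeWhile_cons]
    by_cases h : c ∈ pvSpecialA
    · rw [if_neg (by simp [h]), if_neg (by simp [h])]
    · rw [if_pos h, if_pos (by simp [h]), ih]

def pvQ : Char → Bool := fun c => decide (c ∈ (['\n', ';', '!', '?'] : List Char))

theorem pvLoop2A_eq (l : List Char) (temp : Nat) (h : temp < 2) :
    pvLoop2A l temp = (((splitP pvQ l).take (2 - temp)).flatten).filter (fun c => c ≠ '.') := by
  induction l generalizing temp with
  | nil =>
    obtain ⟨k, hk⟩ : ∃ k, 2 - temp = k + 1 := ⟨2 - temp - 1, by omega⟩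
    rw [hk]
    simp [pvLoop2A, splitP]
  | cons c t ih =>
    by_cases hs : c ∈ pvSpecialA
    · by_cases hd : c = '.'
      · subst hd
        have hq : pvQ '.' = false := by decide
        have hA : pvLoop2A ('.' :: t) temp = pvLoop2A t temp := by
          simp [pvLoop2A, show ('.' : Char) ∈ pvSpecialA by decide]
        have hB : splitP pvQ ('.' :: t) = consHead '.' (splitP pvQ t) := by simp [splitP, hq]
        rw [hA, hB, ih temp h]
        cases ht : splitP pvQ t with
        | nil => exact absurd ht (splitP_ne_nil pvQ t)
        | cons hh r =>
          have h2 : 2 - temp = (2 - temp - 1) + 1 := by omega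
          rw [h2]
          simp [consHead]
      · have hq : pvQ c = true := by
          unfold pvQ
          fin_cases hs
          · decide
          · exact absurd rfl hd
          · decide
          · decide
          · decide
        have hb : (c == '.') = false := by simp [hd]
        have hA : pvLoop2A (c :: t) temp
            = (if temp + 1 == 2 then [] else pvLoop2A t (temp + 1)) := by
          simp [pvLoop2A, hs, hb]
        have hB : splitP pvQ (c :: t) = [] :: splitP pvQ t := by simp [splitP, hq]
        rw [hA, hB]
        by_cases h1 : temp = 1
        · subst h1; simp
        · have h0 : temp = 0 := by omega
          subst h0
          have hcond : ((0 + 1 : Nat) == 2) = false := by decide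
          rw [hcond]
          simp only [Bool.false_eq_true, if_false]
          rw [ih 1 (by omega)]
          simp [List.take_succ_cons]
    · have hq : pvQ c = false := by
        unfold pvQ
        simp only [pvSpecialA, List.mem_cons, List.not_mem_nil, or_false, not_or] at hs
        simp [hs]
      have hd : c ≠ '.' := by
        intro hc; exact hs (by rw [hc]; decide)
      have hA : pvLoop2A (c :: t) temp = c :: pvLoop2A t temp := by simp [pvLoop2A, hs]
      have hB : splitP pvQ (c :: t) = consHead c (splitP pvQ t) := by simp [splitP, hq]
      rw [hA, hB, ih temp h]
      cases ht : splitP pvQ t with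
      | nil => exact absurd ht (splitP_ne_nil pvQ t)
      | cons hh r =>
        have h2 : 2 - temp = (2 - temp - 1) + 1 := by omega
        rw [h2]
        simp [consHead, hd]

theorem replaceDashA_eq_map (l : List Char) : replaceDashA l = translateB l := by
  unfold replaceDashA translateB
  have key : ∀ (acc : List Char),
      l.foldl (fun t2 i => if i ∈ pvWeirdA then t2 ++ [' '] else t2 ++ [i]) acc
        = acc ++ l.map (fun c => if c ∈ pvWeirdB then ' ' else c) := by
    induction l with
    | nil => intro acc; simp
    | cons c t ih =>
      intro acc
      have hw : (c ∈ pvWeirdA) ↔ (c ∈ pvWeirdB) := by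
        constructor <;> intro h <;> revert h <;> simp [pvWeirdA, pvWeirdB]
      by_cases h : c ∈ pvWeirdA
      · simp only [List.foldl_cons, h, if_true, ih, List.map_cons, hw.mp h]
        simp
      · simp only [List.foldl_cons, h, if_false, ih, List.map_cons,
          (not_iff_not.mpr hw).mp h]
        simp
  simpa using key []

theorem first_eq (t : List Char) :
    pvLoop1A t = (splitAllB t ['\n', '.', ';', '!', '?']).headD [] := by
  rw [splitAllB_eq, splitP_headD, pvLoop1A_eq_takeWhile]
  rfl

-- ===== VERDICT (by name: the statement is the Claim_ definition above) =====
theorem newline_cutoff_spec : Claim_equal_newline_cutoff := by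
  intro text _
  unfold Spec_newline_cutoff newline_cutoff newline_cutoff_alt
  dsimp only
  rw [← replaceDashA_eq_map, ← first_eq]
  set t := replaceDashA text.toList with ht
  by_cases hc : (PySem.Chars.split₀ (pvLoop1A t)).length < 3
  · have : ¬ 3 ≤ (PySem.Chars.split₀ (pvLoop1A t)).length := by omega
    simp only [hc, if_true, this, if_false]
    rw [pvLoop2A_eq t 0 (by omega), splitAllB_eq]
    rfl
  · have : 3 ≤ (PySem.Chars.split₀ (pvLoop1A t)).length := by omega
    simp [hc, this]
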